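-- pv_equiv track=rewrite | github.com/0AnonymousSubmission/uai_2026_submission | experiments/dataset_loader.py | _generate_polynomial_terms
-- ===== SOURCE A (Python) =====
-- def _generate_polynomial_terms(n_features: int, degree: int, interaction_only: bool = False):
--     """
--     Generate all polynomial term exponent tuples up to a given degree.
--
--     Each term is represented as a tuple of exponents, one per feature.
--     E.g., for 2 features: (0, 0) = bias, (1, 0) = x1, (0, 1) = x2,
--                           (2, 0) = x1^2, (1, 1) = x1*x2, (0, 2) = x2^2
--
--     Args:
--         n_features: Number of input features.
--         degree: Maximum total degree of terms.
--         interaction_only: If True, exclude pure power terms (e.g., x1^2).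
--
--     Returns:
--         List of tuples, each tuple contains exponents for each feature.
--     """
--     from itertools import combinations_with_replacement
--
--     terms = []
--
--     # Generate terms of each total degree from 0 to degree
--     for d in range(degree + 1):
--         # Generate all ways to distribute degree d among n_features
--         for combo in combinations_with_replacement(range(n_features), d):
--             exponents = [0] * n_features
--             for idx in combo:
--                 exponents[idx] += 1
--
--             # Skip pure powers if interaction_only
--             if interaction_only and d > 1:
--                 non_zero_count = sum(1 for e in exponents if e > 0)
--                 if non_zero_count < 2:
--                     continue
--
--             term = tuple(exponents)
--             if term not in terms:
--                 terms.append(term)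
--
--     return terms
-- ===== SOURCE B (Python) =====
-- def _generate_polynomial_terms(n_features: int, degree: int, interaction_only: bool = False):
--     """Recursive exponent-distribution instead of combinations_with_replacement."""
--     def distribute(features_left, remaining):
--         if features_left <= 0:
--             if remaining == 0:
--                 yield ()
--             return
--         if features_left == 1:
--             yield (remaining,)
--             return
--         for e in range(remaining, -1, -1):
--             for rest in distribute(features_left - 1, remaining - e):
--                 yield (e,) + rest
--
--     terms = []
--     for d in range(degree + 1):
--         for term in distribute(n_features, d):
--             if interaction_only and d > 1:
--                 if sum(1 for e in term if e > 0) < 2: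
--                     continue
--             terms.append(term)
--     return terms
-- ===== Notes on version B (the rewrite author's own statement) =====
-- stated objective: alternative
-- what changed: Replaces combinations_with_replacement over feature indices plus a per-combo counting pass and a linear duplicate-membership scan by a direct recursive distribution of the degree over the features that emits each exponent tuple exactly once, so the counting array and the 'term not in terms' scan disappear.
import Mathlib
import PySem

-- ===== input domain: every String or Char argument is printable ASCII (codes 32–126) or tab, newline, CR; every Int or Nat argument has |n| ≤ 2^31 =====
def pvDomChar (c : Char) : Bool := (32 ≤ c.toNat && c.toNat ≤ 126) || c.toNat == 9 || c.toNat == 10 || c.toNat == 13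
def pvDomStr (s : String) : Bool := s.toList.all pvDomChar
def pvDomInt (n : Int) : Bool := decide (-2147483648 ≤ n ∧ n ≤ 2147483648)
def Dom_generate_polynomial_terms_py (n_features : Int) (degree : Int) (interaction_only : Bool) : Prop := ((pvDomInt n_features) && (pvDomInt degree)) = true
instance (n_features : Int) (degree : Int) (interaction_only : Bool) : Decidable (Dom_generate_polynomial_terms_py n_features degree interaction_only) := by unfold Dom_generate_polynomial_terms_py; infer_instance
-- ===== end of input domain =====

-- B replaces combinations_with_replacement + counting + a duplicate-membership scan by a direct
-- recursive distribution of the degree over the features (objective: alternative algorithm).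

-- ===== PORT A =====
-- Hand port of itertools.combinations_with_replacement(pool, d): same tuples in the same
-- (lexicographic over pool positions, nondecreasing) order; exact for every list pool and d ≥ 0.
def pvA_cwr (pool : List Int) (d : Nat) : List (List Int) :=
  match d, pool with
  | 0, _ => [[]]
  | Nat.succ d', [] => []
  | Nat.succ d', x :: rest =>
      ((pvA_cwr (x :: rest) d').map (fun c => x :: c)) ++ pvA_cwr rest (Nat.succ d')
termination_by (d, pool.length)

-- exponents = [0]*n_features; for idx in combo: exponents[idx] += 1
-- (idx.toNat is exact: combo elements come from range(n_features), hence are ≥ 0)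
def pvA_exps (n_features : Int) (combo : List Int) : List Int :=
  combo.foldl (fun ex idx => ex.modify idx.toNat (· + 1)) (List.replicate n_features.toNat 0)

-- the body of A's inner loop (exponents / interaction_only filter / 'term not in terms' append)
def pvA_step (n_features : Int) (io : Bool) (d : Int) (terms : List (List Int)) (combo : List Int) : List (List Int) :=
  let exponents := pvA_exps n_features combo
  if io && decide (1 < d) && decide ((exponents.foldl (fun c e => if 0 < e then c + 1 else c) (0 : Int)) < 2) then terms
  else if exponents ∈ terms then terms else terms ++ [exponents]

def generate_polynomial_terms_py (n_features : Int) (degree : Int) (interaction_only : Bool) : List (List Int) :=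
  (PySem.List.pyRange 0 (degree + 1) 1).foldl (fun terms d =>
    -- d ≥ 0 on this range, so d.toNat is exact
    (pvA_cwr (PySem.List.pyRange 0 n_features 1) d.toNat).foldl
      (pvA_step n_features interaction_only d) terms) []

-- ===== PORT B =====
-- def distribute(features_left, remaining): ...
def pvB_distribute (featuresLeft : Int) (remaining : Int) : List (List Int) :=
  if featuresLeft ≤ 0 then (if remaining = 0 then [[]] else [])
  else if featuresLeft = 1 then [[remaining]]
  else (PySem.List.pyRange remaining (-1) (-1)).foldl
        (fun acc e => acc ++ (pvB_distribute (featuresLeft - 1) (remaining - e)).map (fun rest => e :: rest)) []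
termination_by featuresLeft.toNat
decreasing_by omega

-- the body of B's inner loop (interaction_only filter / plain append)
def pvB_step (io : Bool) (d : Int) (terms : List (List Int)) (term : List Int) : List (List Int) :=
  if io && decide (1 < d) && decide ((term.foldl (fun c e => if 0 < e then c + 1 else c) (0 : Int)) < 2) then terms
  else terms ++ [term]

def generate_polynomial_terms_py_alt (n_features : Int) (degree : Int) (interaction_only : Bool) : List (List Int) :=
  (PySem.List.pyRange 0 (degree + 1) 1).foldl (fun terms d =>
    (pvB_distribute n_features d).foldl (pvB_step interaction_only d) terms) []

-- ===== PRECONDITION & SPEC =====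
def Spec_generate_polynomial_terms_py (n_features : Int) (degree : Int) (interaction_only : Bool) (out : List (List Int)) : Prop := out = generate_polynomial_terms_py_alt n_features degree interaction_only
instance (n_features : Int) (degree : Int) (interaction_only : Bool) (out : List (List Int)) : Decidable (Spec_generate_polynomial_terms_py n_features degree interaction_only out) := by unfold Spec_generate_polynomial_terms_py; infer_instance

-- ===== CLAIM (what is proved, stated in full; the proofs are below) =====
def Claim_equal_generate_polynomial_terms_py : Prop := ∀ (n_features : Int) (degree : Int) (interaction_only : Bool), Dom_generate_polynomial_terms_py n_features degree interaction_only → Spec_generate_polynomial_terms_py n_features degree interaction_only (generate_polynomial_terms_py n_features degree interaction_only)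

-- ===== LEMMAS AND PROOFS =====
-- descending list r, r-1, ..., 0 (the value of range(r, -1, -1) for r ≥ 0)
def pvDesc : Nat → List Int
  | 0 => [0]
  | r + 1 => ((r : Int) + 1) :: pvDesc r

theorem pvDesc_eq_pyRange_nat (r : Nat) :
    PySem.List.pyRange (r : Int) (-1) (-1) = pvDesc r := by
  induction r with
  | zero =>
      rw [show ((0:Nat):Int) = 0 from rfl]
      rw [PySem.List.pyRange_neg_one_cons (by norm_num)]
      rw [PySem.List.pyRange_neg_one_eq_nil (by norm_num)]
      rfl
  | succ r ih =>
      rw [PySem.List.pyRange_neg_one_cons (by push_cast; omega)]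
      have h1 : (((r:Nat) + 1 : Nat) : Int) - 1 = (r : Int) := by push_cast; ring
      rw [h1, ih]
      simp [pvDesc]

theorem pvDesc_eq_pyRange (r : Int) (hr : 0 ≤ r) :
    PySem.List.pyRange r (-1) (-1) = pvDesc r.toNat := by
  have h := pvDesc_eq_pyRange_nat r.toNat
  rw [show ((r.toNat : Nat) : Int) = r from by omega] at h
  exact h

theorem mem_pvDesc {r : Nat} {e : Int} : e ∈ pvDesc r ↔ 0 ≤ e ∧ e ≤ (r : Int) := by
  induction r with
  | zero => simp [pvDesc]; omega
  | succ r ih =>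
      simp only [pvDesc, List.mem_cons, ih]
      push_cast
      omega

theorem pvDesc_nodup (r : Nat) : (pvDesc r).Nodup := by
  induction r with
  | zero => simp [pvDesc]
  | succ r ih =>
      refine List.Nodup.cons ?_ ih
      intro hmem
      have := mem_pvDesc.mp hmem
      omega

theorem pvDesc_shift (r : Nat) : pvDesc (r + 1) = (pvDesc r).map (· + 1) ++ [0] := by
  induction r with
  | zero => rfl
  | succ r ih =>
      have h1 : pvDesc (r + 1 + 1) = (((r + 1 : Nat) : Int) + 1) :: pvDesc (r + 1) := rfl
      have h2 : pvDesc (r + 1) = (((r : Nat) : Int) + 1) :: pvDesc r := rfl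
      rw [h1]
      conv_rhs => rw [h2]
      rw [ih]
      simp only [List.map_cons, List.cons_append]
      congr 1

theorem pvB_distribute_flatMap (k r : Int) (hk : 2 ≤ k) (hr : 0 ≤ r) :
    pvB_distribute k r =
      (pvDesc r.toNat).flatMap (fun e => (pvB_distribute (k - 1) (r - e)).map (fun rest => e :: rest)) := by
  rw [pvB_distribute]
  rw [if_neg (by omega), if_neg (by omega)]
  rw [pvDesc_eq_pyRange r hr]
  rw [PySem.List.foldl_append_eq_flatMap]
  simp

theorem pvB_distribute_zero_aux : ∀ (m : Nat) (k : Int), k.toNat ≤ m →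
    pvB_distribute k 0 = [List.replicate k.toNat 0] := by
  intro m
  induction m with
  | zero =>
      intro k hk
      rw [pvB_distribute, if_pos (by omega : k ≤ 0), if_pos rfl]
      rw [show k.toNat = 0 from by omega]
      rfl
  | succ m ih =>
      intro k hk
      by_cases h1 : k ≤ 0
      · rw [pvB_distribute, if_pos h1, if_pos rfl]
        rw [show k.toNat = 0 from by omega]
        rfl
      · by_cases h2 : k = 1
        · rw [pvB_distribute, if_neg h1, if_pos h2]
          subst h2; rfl
        · rw [pvB_distribute_flatMap k 0 (by omega) le_rfl]
          rw [show ((0:Int)).toNat = 0 from rfl]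
          simp only [pvDesc, List.flatMap_cons, List.flatMap_nil, List.append_nil, sub_zero]
          rw [ih (k - 1) (by omega)]
          rw [show k.toNat = (k - 1).toNat + 1 from by omega]
          rw [List.replicate_succ]
          rfl

theorem pvB_distribute_zero (k : Int) : pvB_distribute k 0 = [List.replicate k.toNat 0] :=
  pvB_distribute_zero_aux k.toNat k le_rfl

theorem pvB_distribute_sum_aux : ∀ (m : Nat) (k r : Int), k.toNat ≤ m → 0 ≤ r →
    ∀ v ∈ pvB_distribute k r, v.sum = r := by
  intro m
  induction m with
  | zero =>
      intro k r hk hr v hv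
      rw [pvB_distribute, if_pos (by omega : k ≤ 0)] at hv
      by_cases h0 : r = 0
      · subst h0; simp at hv; simp [hv]
      · rw [if_neg h0] at hv; simp at hv
  | succ m ih =>
      intro k r hk hr v hv
      by_cases h1 : k ≤ 0
      · rw [pvB_distribute, if_pos h1] at hv
        by_cases h0 : r = 0
        · subst h0; simp at hv; simp [hv]
        · rw [if_neg h0] at hv; simp at hv
      · by_cases h2 : k = 1
        · rw [pvB_distribute, if_neg h1, if_pos h2] at hv
          simp at hv; simp [hv]
        · rw [pvB_distribute_flatMap k r (by omega) hr] at hv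
          simp only [List.mem_flatMap, List.mem_map] at hv
          obtain ⟨e, he, w, hw, rfl⟩ := hv
          have hb := mem_pvDesc.mp he
          have hsum := ih (k - 1) (r - e) (by omega) (by omega) w hw
          simp [hsum]

theorem pvB_distribute_sum (k r : Int) (hr : 0 ≤ r) :
    ∀ v ∈ pvB_distribute k r, v.sum = r :=
  pvB_distribute_sum_aux k.toNat k r le_rfl hr

theorem pvB_distribute_nodup_aux : ∀ (m : Nat) (k r : Int), k.toNat ≤ m → 0 ≤ r →
    (pvB_distribute k r).Nodup := by
  intro m
  induction m with
  | zero =>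
      intro k r hk hr
      rw [pvB_distribute, if_pos (by omega : k ≤ 0)]
      split <;> simp
  | succ m ih =>
      intro k r hk hr
      by_cases h1 : k ≤ 0
      · rw [pvB_distribute, if_pos h1]
        split <;> simp
      · by_cases h2 : k = 1
        · rw [pvB_distribute, if_neg h1, if_pos h2]; simp
        · rw [pvB_distribute_flatMap k r (by omega) hr]
          rw [List.nodup_flatMap]
          refine ⟨?_, ?_⟩
          · intro e he
            have hb := mem_pvDesc.mp he
            exact (ih (k - 1) (r - e) (by omega) (by omega)).map List.cons_injective
          · refine (pvDesc_nodup r.toNat).imp ?_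
            intro e e' hne x hx hx'
            simp only [List.mem_map] at hx hx'
            obtain ⟨w, _, rfl⟩ := hx
            obtain ⟨w', _, h⟩ := hx'
            injection h with hhead _
            exact hne hhead.symm

theorem pvB_distribute_nodup (k r : Int) (hr : 0 ≤ r) : (pvB_distribute k r).Nodup :=
  pvB_distribute_nodup_aux k.toNat k r le_rfl hr

theorem pvB_bump (k r : Int) (hk : 1 ≤ k) (hr : 0 ≤ r) :
    ((pvB_distribute k r).map (fun v => v.modify 0 (· + 1))) ++
      ((pvB_distribute (k - 1) (r + 1)).map (fun v => (0 : Int) :: v)) =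
    pvB_distribute k (r + 1) := by
  by_cases h2 : k = 1
  · subst h2
    rw [show (1:Int) - 1 = 0 from rfl]
    rw [pvB_distribute, if_neg (by omega), if_pos rfl]
    rw [show pvB_distribute 0 (r + 1) = [] from by
      rw [pvB_distribute, if_pos le_rfl, if_neg (by omega)]]
    rw [show pvB_distribute 1 (r + 1) = [[r + 1]] from by
      rw [pvB_distribute, if_neg (by omega), if_pos rfl]]
    simp [List.modify_cons]
  · have hk2 : 2 ≤ k := by omega
    rw [pvB_distribute_flatMap k r hk2 hr,
        pvB_distribute_flatMap k (r + 1) hk2 (by omega)]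
    have htn : (r + 1).toNat = r.toNat + 1 := by omega
    rw [htn, pvDesc_shift, List.flatMap_append, List.flatMap_map]
    rw [List.map_flatMap]
    congr 1
    · apply List.flatMap_congr
      intro e _
      have harith : r + 1 - (e + 1) = r - e := by ring
      rw [harith, List.map_map]
      apply List.map_congr_left
      intro w _
      simp [List.modify_cons]
    · simp

theorem pv_modify_comm (l : List Int) (i j : Nat) :
    (l.modify i (· + 1)).modify j (· + 1) = (l.modify j (· + 1)).modify i (· + 1) := by
  apply List.ext_getElem
  · simp
  · intro m h1 h2
    simp only [List.getElem_modify] at *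
    split_ifs <;> omega

theorem pvA_fold_modify (c : List Int) (base : List Int) (j : Nat) :
    c.foldl (fun ex idx => ex.modify idx.toNat (· + 1)) (base.modify j (· + 1)) =
      (c.foldl (fun ex idx => ex.modify idx.toNat (· + 1)) base).modify j (· + 1) := by
  induction c generalizing base with
  | nil => rfl
  | cons x c ih =>
      simp only [List.foldl_cons]
      rw [pv_modify_comm, ih]

theorem pvA_exps_cons (n x : Int) (c : List Int) :
    pvA_exps n (x :: c) = (pvA_exps n c).modify x.toNat (· + 1) := by
  unfold pvA_exps
  simp only [List.foldl_cons]
  exact pvA_fold_modify c _ x.toNat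

theorem pv_modify_append (l1 l2 : List Int) :
    (l1 ++ l2).modify l1.length (· + 1) = l1 ++ l2.modify 0 (· + 1) := by
  induction l1 with
  | nil => rfl
  | cons a l1 ih => simp [ih]

theorem pv_modify_append_rep (a : Nat) (l2 : List Int) :
    (List.replicate a (0:Int) ++ l2).modify a (· + 1) = List.replicate a (0:Int) ++ l2.modify 0 (· + 1) := by
  have h := pv_modify_append (List.replicate a (0:Int)) l2
  rwa [List.length_replicate] at h

theorem pv_main_base (a n : Nat) (han : a ≤ n) :
    (pvA_cwr (PySem.List.pyRange (a : Int) (n : Int) 1) 0).map (fun c => pvA_exps (n : Int) c) =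
      (pvB_distribute ((n : Int) - (a : Int)) ((0 : Nat) : Int)).map (fun v => List.replicate a (0 : Int) ++ v) := by
  rw [show pvA_cwr (PySem.List.pyRange (a : Int) (n : Int) 1) 0 = [[]] from by rw [pvA_cwr]]
  rw [show (((0:Nat)) : Int) = 0 from rfl, pvB_distribute_zero]
  simp only [List.map_cons, List.map_nil]
  rw [show pvA_exps (n : Int) [] = List.replicate ((n : Int)).toNat 0 from rfl]
  rw [← List.replicate_add]
  rw [show ((n : Int)).toNat = a + ((n : Int) - (a : Int)).toNat from by omega]

-- MAIN: counting a cwr combo over the index window [a, n) is B's distribute on n - a features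
theorem pv_main : ∀ (m d a n : Nat), a ≤ n → d + (n - a) ≤ m →
    (pvA_cwr (PySem.List.pyRange (a : Int) (n : Int) 1) d).map (fun c => pvA_exps (n : Int) c) =
      (pvB_distribute ((n : Int) - (a : Int)) (d : Int)).map (fun v => List.replicate a (0 : Int) ++ v) := by
  intro m
  induction m with
  | zero =>
      intro d a n han hm
      rw [show d = 0 from by omega]
      exact pv_main_base a n han
  | succ m ih =>
      intro d a n han hm
      match d with
      | 0 => exact pv_main_base a n han
      | Nat.succ d' =>
          by_cases hlt : a < n
          · have hpool : PySem.List.pyRange (a : Int) (n : Int) 1 =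
                (a : Int) :: PySem.List.pyRange ((a + 1 : Nat) : Int) (n : Int) 1 := by
              rw [PySem.List.pyRange_one_cons (by exact_mod_cast hlt)]
              push_cast
              rfl
            rw [hpool]
            rw [show pvA_cwr ((a : Int) :: PySem.List.pyRange ((a + 1 : Nat) : Int) (n : Int) 1) (Nat.succ d')
                = ((pvA_cwr ((a : Int) :: PySem.List.pyRange ((a + 1 : Nat) : Int) (n : Int) 1) d').map
                    (fun c => (a : Int) :: c)) ++
                  pvA_cwr (PySem.List.pyRange ((a + 1 : Nat) : Int) (n : Int) 1) (Nat.succ d') from by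
              rw [pvA_cwr]]
            rw [← hpool, List.map_append, List.map_map]
            have hchunk1 : ((pvA_cwr (PySem.List.pyRange (a : Int) (n : Int) 1) d').map
                ((fun c => pvA_exps (n : Int) c) ∘ (fun c => (a : Int) :: c)))
                = ((pvB_distribute ((n : Int) - (a : Int)) (d' : Int)).map
                    (fun v => List.replicate a (0 : Int) ++ v.modify 0 (· + 1))) := by
              have hcomp : ((fun c => pvA_exps (n : Int) c) ∘ (fun c => (a : Int) :: c))
                  = (fun v => v.modify a (· + 1)) ∘ (fun c => pvA_exps (n : Int) c) := by
                funext c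
                simp only [Function.comp]
                rw [pvA_exps_cons]
                congr 1
              rw [hcomp, ← List.map_map]
              rw [ih d' a n han (by omega)]
              rw [List.map_map]
              apply List.map_congr_left
              intro v _
              simp only [Function.comp]
              exact pv_modify_append_rep a v
            rw [hchunk1]
            have hchunk2 : (pvA_cwr (PySem.List.pyRange ((a + 1 : Nat) : Int) (n : Int) 1) (Nat.succ d')).map
                (fun c => pvA_exps (n : Int) c)
                = (pvB_distribute ((n : Int) - (a : Int) - 1) ((d' : Int) + 1)).map
                    (fun v => List.replicate a (0 : Int) ++ ((0:Int) :: v)) := by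
              rw [ih (Nat.succ d') (a + 1) n (by omega) (by omega)]
              have hsub : (n : Int) - ((a + 1 : Nat) : Int) = (n : Int) - (a : Int) - 1 := by
                push_cast; ring
              have hd : ((Nat.succ d' : Nat) : Int) = (d' : Int) + 1 := by omega
              rw [hsub, hd]
              apply List.map_congr_left
              intro v _
              rw [List.replicate_succ']
              simp
            rw [hchunk2]
            have hd : ((Nat.succ d' : Nat) : Int) = (d' : Int) + 1 := by omega
            rw [hd]
            rw [← pvB_bump ((n : Int) - (a : Int)) (d' : Int) (by omega) (by omega)]
            simp [List.map_append, List.map_map, Function.comp_def]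
          · have hae : a = n := by omega
            subst hae
            rw [PySem.List.pyRange_one_eq_nil le_rfl]
            rw [show pvA_cwr ([] : List Int) (Nat.succ d') = [] from by rw [pvA_cwr]]
            rw [show (a : Int) - (a : Int) = 0 from by ring]
            rw [show pvB_distribute 0 ((Nat.succ d' : Nat) : Int) = [] from by
              rw [pvB_distribute, if_pos le_rfl, if_neg (by push_cast; omega)]]
            rfl

theorem pv_inner (n : Int) (d : Nat) :
    (pvA_cwr (PySem.List.pyRange 0 n 1) d).map (fun c => pvA_exps n c) = pvB_distribute n (d : Int) := by
  by_cases hn : 0 < n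
  · have hcast : n = ((n.toNat : Nat) : Int) := by omega
    rw [hcast]
    rw [show (0 : Int) = ((0 : Nat) : Int) from rfl]
    rw [pv_main (d + n.toNat) d 0 n.toNat (by omega) (by omega)]
    simp
  · match d with
    | 0 =>
        rw [show pvA_cwr (PySem.List.pyRange 0 n 1) 0 = [[]] from by rw [pvA_cwr]]
        rw [show ((0:Nat):Int) = 0 from rfl, pvB_distribute_zero]
        rfl
    | Nat.succ d' =>
        rw [PySem.List.pyRange_one_eq_nil (by omega)]
        rw [show pvA_cwr ([] : List Int) (Nat.succ d') = [] from by rw [pvA_cwr]]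
        rw [pvB_distribute, if_pos (by omega), if_neg (by push_cast; omega)]
        rfl

-- the interaction_only filter, as a predicate on finished exponent tuples
def pvFilt (io : Bool) (d : Int) (v : List Int) : Bool :=
  io && decide (1 < d) && decide ((v.foldl (fun c e => if 0 < e then c + 1 else c) (0 : Int)) < 2)

theorem pv_foldl_comp {α β γ : Type} (f : α → β → α) (h : α → γ → α) (g : β → γ)
    (hfg : ∀ x y, f x y = h x (g y)) (l : List β) (init : α) :
    l.foldl f init = (l.map g).foldl h init := by
  rw [List.foldl_map]
  congr 1
  funext x y
  exact hfg x y

theorem pv_ded (p : List Int → Bool) :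
    ∀ (L t : List (List Int)), L.Nodup → (∀ v ∈ L, v ∉ t) →
    L.foldl (fun terms v => if p v then terms else if v ∈ terms then terms else terms ++ [v]) t =
    L.foldl (fun terms v => if p v then terms else terms ++ [v]) t := by
  intro L
  induction L with
  | nil => intro t _ _; rfl
  | cons v L ih =>
      intro t hnd hnin
      simp only [List.foldl_cons]
      by_cases hp : p v
      · simp only [if_pos hp]
        exact ih t hnd.of_cons (fun w hw => hnin w (List.mem_cons_of_mem _ hw))
      · simp only [if_neg hp]
        rw [if_neg (hnin v (List.mem_cons_self))]
        apply ih (t ++ [v]) hnd.of_cons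
        intro w hw
        simp only [List.mem_append, List.mem_singleton]
        rintro (h | rfl)
        · exact hnin w (List.mem_cons_of_mem _ hw) h
        · exact (List.nodup_cons.mp hnd).1 hw

theorem pv_skip_if (p : List Int → Bool) :
    ∀ (L : List (List Int)) (t : List (List Int)),
    L.foldl (fun acc v => if p v then acc else acc ++ [v]) t = t ++ L.filter (fun v => !p v) := by
  intro L
  induction L with
  | nil => intro t; simp
  | cons v L ih =>
      intro t
      simp only [List.foldl_cons, List.filter_cons]
      by_cases hp : p v
      · simp [hp, ih]
      · simp [hp, ih]

theorem pv_outer (n : Int) (io : Bool) :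
    ∀ (ds : List Int), ds.Pairwise (· < ·) → (∀ dd ∈ ds, 0 ≤ dd) →
    ∀ t : List (List Int), (∀ v ∈ t, ∀ dd ∈ ds, v.sum < dd) →
    ds.foldl (fun terms d =>
        (pvA_cwr (PySem.List.pyRange 0 n 1) d.toNat).foldl (pvA_step n io d) terms) t =
    ds.foldl (fun terms d =>
        (pvB_distribute n d).foldl (pvB_step io d) terms) t := by
  intro ds
  induction ds with
  | nil => intro _ _ t _; rfl
  | cons dd ds ih =>
      intro hpair hpos t ht
      simp only [List.foldl_cons]
      have hdd : 0 ≤ dd := hpos dd (List.mem_cons_self)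
      have hDeq : (pvA_cwr (PySem.List.pyRange 0 n 1) dd.toNat).map (fun c => pvA_exps n c)
          = pvB_distribute n dd := by
        rw [pv_inner n dd.toNat]
        congr 1
        omega
      have hsumD : ∀ v ∈ pvB_distribute n dd, v.sum = dd := pvB_distribute_sum n dd hdd
      have hA : (pvA_cwr (PySem.List.pyRange 0 n 1) dd.toNat).foldl (pvA_step n io dd) t
          = t ++ (pvB_distribute n dd).filter (fun v => !(pvFilt io dd v)) := by
        rw [pv_foldl_comp (pvA_step n io dd)
            (fun terms v => if pvFilt io dd v then terms
              else if v ∈ terms then terms else terms ++ [v])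
            (fun c => pvA_exps n c) (fun x y => rfl)]
        rw [hDeq]
        rw [pv_ded (pvFilt io dd) (pvB_distribute n dd) t (pvB_distribute_nodup n dd hdd)
            (fun v hv hvt => absurd (hsumD v hv) (by have := ht v hvt dd (List.mem_cons_self); omega))]
        exact pv_skip_if (pvFilt io dd) (pvB_distribute n dd) t
      have hB : (pvB_distribute n dd).foldl (pvB_step io dd) t
          = t ++ (pvB_distribute n dd).filter (fun v => !(pvFilt io dd v)) := by
        rw [show pvB_step io dd = fun terms v => if pvFilt io dd v then terms else terms ++ [v] from rfl]
        exact pv_skip_if (pvFilt io dd) (pvB_distribute n dd) t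
      rw [hA, hB]
      apply ih hpair.of_cons (fun d hd => hpos d (List.mem_cons_of_mem _ hd))
      intro v hv dd' hdd'
      have hlt : dd < dd' := (List.pairwise_cons.mp hpair).1 dd' hdd'
      rcases List.mem_append.mp hv with h | h
      · have := ht v h dd' (List.mem_cons_of_mem _ hdd')
        omega
      · have := hsumD v (List.mem_of_mem_filter h)
        omega

-- ===== VERDICT (by name: the statement is the Claim_ definition above) =====
theorem generate_polynomial_terms_py_spec : Claim_equal_generate_polynomial_terms_py := by
  intro n_features degree interaction_only _
  unfold Spec_generate_polynomial_terms_py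
  unfold generate_polynomial_terms_py generate_polynomial_terms_py_alt
  apply pv_outer
  · exact PySem.List.pairwise_lt_pyRange_one 0 (degree + 1)
  · intro dd hdd
    exact (PySem.List.mem_pyRange_one.mp hdd).1
  · intro v hv
    simp at hv
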